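-- pv_equiv track=rewrite | github.com/rsirefelt/advent_of_code | 2021/dec10/jesper_ericsson/main.py | get_incomplete_score
-- ===== SOURCE A (Python) =====
-- def get_incomplete_score(row):
--     end_signs = [")", "]", "}", ">"]
--     scores = [3, 57, 1197, 25137]
--     new_score = 0
--     first_ind = 1000
--     for score_ind, sign in enumerate(end_signs):
--         ind = row.find(sign)
--         if ind > -1 and ind < first_ind:
--             first_ind = ind
--             new_score = scores[score_ind]
--     return new_score
-- ===== SOURCE B (Python) =====
-- def get_incomplete_score(row):
--     scores = {")": 3, "]": 57, "}": 1197, ">": 25137}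
--     for ch in row:
--         if ch in scores:
--             return scores[ch]
--     return 0
-- ===== Notes on version B (the rewrite author's own statement) =====
-- stated objective: simpler
-- what changed: Replaced the four whole-string find() scans with running minimum-index/score bookkeeping by a single left-to-right pass that returns the dict score of the first closing bracket (0 if none).
-- intended difference: On rows whose first closing bracket sits at index >= 1000 (none earlier), A returns 0 because its initial first_ind sentinel of 1000 rejects that index, while B returns that bracket's score, which is the intended value for the function's purpose. — e.g. on get_incomplete_score("aaaaaaaaaaaaaaaaaaaaaaaaaaaaaaaaaaaaaaaaaaaaaaaaaaaaaaaaaaaaaaaaaaaaaaaaaaaaaaaaaaaaaaaaaaaaaaaaaaaaaaaaaaaaaaaaaaaaaa…): A returns 0, B returns 3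
import Mathlib
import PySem

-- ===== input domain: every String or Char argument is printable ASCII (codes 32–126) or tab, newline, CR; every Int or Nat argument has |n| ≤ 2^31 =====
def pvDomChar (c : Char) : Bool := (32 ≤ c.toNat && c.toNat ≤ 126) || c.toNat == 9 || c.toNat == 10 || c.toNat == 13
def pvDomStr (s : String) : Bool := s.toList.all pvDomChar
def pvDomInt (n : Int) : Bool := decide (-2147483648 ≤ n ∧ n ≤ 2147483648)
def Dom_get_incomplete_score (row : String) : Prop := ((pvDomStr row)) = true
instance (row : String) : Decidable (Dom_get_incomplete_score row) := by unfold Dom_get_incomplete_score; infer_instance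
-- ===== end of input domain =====

-- B replaces A's four whole-string find() scans and min-index bookkeeping by a single
-- left-to-right pass returning the score of the first closing bracket (objective: simpler);
-- where the first closing bracket sits at index >= 1000, A's sentinel makes it return 0 and B
-- returns the bracket's score (see D_ below).

-- ===== PORT A =====
-- enumerate(xs)
def pvEnumerate (xs : List String) : List (Nat × String) := (List.range xs.length).zip xs

def get_incomplete_score (row : String) : Int :=
  let end_signs : List String := [")", "]", "}", ">"]
  let scores : List Int := [3, 57, 1197, 25137]
  -- loop state (new_score, first_ind) over enumerate(end_signs)
  let st : Int × Int := (pvEnumerate end_signs).foldl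
    (fun (st : Int × Int) (p : Nat × String) =>
      let ind := PySem.Str.find row p.2
      if ind > -1 ∧ ind < st.2 then (PySem.List.pyGetD scores (p.1 : Int) 0, ind) else st)
    (0, 1000)
  st.1

-- ===== PORT B =====
-- the 'for ch in row: if ch in scores: return scores[ch]' loop
def pvAltGo (scores : PySem.Dict Char Int) : List Char → Int
  | [] => 0
  | c :: t =>
    match scores.get? c with
    | some v => v
    | none => pvAltGo scores t

def get_incomplete_score_alt (row : String) : Int :=
  let scores : PySem.Dict Char Int := PySem.Dict.ofList [(')', 3), (']', 57), ('}', 1197), ('>', 25137)]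
  pvAltGo scores row.toList

-- ===== PRECONDITION & SPEC =====
-- is c one of the four closing brackets?
def pvIsClose (c : Char) : Bool := c == ')' || c == ']' || c == '}' || c == '>'

-- On rows whose first closing bracket sits at index >= 1000 (none earlier), A returns 0 because
-- its initial first_ind sentinel of 1000 rejects that index, while B returns that bracket's
-- score, the intended value for the function's purpose.
def D_get_incomplete_score (row : String) : Prop :=
  ((row.toList.take 1000).all (fun c => !pvIsClose c) = true) ∧ (row.toList.any pvIsClose = true)
instance (row : String) : Decidable (D_get_incomplete_score row) := by
  unfold D_get_incomplete_score; infer_instance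

def Spec_get_incomplete_score (row : String) (out : Int) : Prop :=
  ¬ D_get_incomplete_score row → out = get_incomplete_score_alt row
instance (row : String) (out : Int) : Decidable (Spec_get_incomplete_score row out) := by
  unfold Spec_get_incomplete_score; infer_instance

def pvDiffWitness_get_incomplete_score : String := "aaaaaaaaaaaaaaaaaaaaaaaaaaaaaaaaaaaaaaaaaaaaaaaaaaaaaaaaaaaaaaaaaaaaaaaaaaaaaaaaaaaaaaaaaaaaaaaaaaaaaaaaaaaaaaaaaaaaaaaaaaaaaaaaaaaaaaaaaaaaaaaaaaaaaaaaaaaaaaaaaaaaaaaaaaaaaaaaaaaaaaaaaaaaaaaaaaaaaaaaaaaaaaaaaaaaaaaaaaaaaaaaaaaaaaaaaaaaaaaaaaaaaaaaaaaaaaaaaaaaaaaaaaaaaaaaaaaaaaaaaaaaaaaaaaaaaaaaaaaaaaaaaaaaaaaaaaaaaaaaaaaaaaaaaaaaaaaaaaaaaaaaaaaaaaaaaaaaaaaaaaaaaaaaaaaaaaaaaaaaaaaaaaaaaaaaaaaaaaaaaaaaaaaaaaaaaaaaaaaaaaaaaaaaaaaaaaaaaaaaaaaaaaaaaaaaaa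aaaaaaaaaaaaaaaaaaaaaaaaaaaaaaaaaaaaaaaaaaaaaaaaaaaaaaaaaaaaaaaaaaaaaaaaaaaaaaaaaaaaaaaaaaaaaaaaaaaaaaaaaaaaaaaaaaaaaaaaaaaaaaaaaaaaaaaaaaaaaaaaaaaaaaaaaaaaaaaaaaaaaaaaaaaaaaaaaaaaaaaaaaaaaaaaaaaaaaaaaaaaaaaaaaaaaaaaaaaaaaaaaaaaaaaaaaaaaaaaaaaaaaaaaaaaaaaaaaaaaaaaaaaaaaaaaaaaaaaaaaaaaaaaaaaaaaaaaaaaaaaaaaaaaaaaaaaaaaaaaaaaaaaaaaaaaaaaaaaaaaaaaaaaaaaaaaaaaaaaaaaaaaaaaaaaaaaaaaaaaaaaaaaaaaaaaaaaaaaaaaaaaaaaaaaaaaaaaaaaaaaaaaaaaaaaaaaaaaaaaaaaaaaaaaaaaaaaaaaaaaaaaaaaaaaaaaaaaaaaaaaaaaaaaaaaaaaaaaaaaaaaaaaaaaaaaaaaaaaaaaaaaaaaaaaaaaaaaaaaaaaaaa)"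
def pvDiffWitnessOut_get_incomplete_score : Int × Int := (0, 3)

-- ===== CLAIM (what is proved, stated in full; the proofs are below) =====
def Claim_unchanged_get_incomplete_score : Prop := ∀ (row : String), Dom_get_incomplete_score row → Spec_get_incomplete_score row (get_incomplete_score row)
def Claim_changed_get_incomplete_score : Prop := Dom_get_incomplete_score (pvDiffWitness_get_incomplete_score) ∧ D_get_incomplete_score (pvDiffWitness_get_incomplete_score) ∧ get_incomplete_score (pvDiffWitness_get_incomplete_score) = pvDiffWitnessOut_get_incomplete_score.1 ∧ get_incomplete_score_alt (pvDiffWitness_get_incomplete_score) = pvDiffWitnessOut_get_incomplete_score.2 ∧ pvDiffWitnessOut_get_incomplete_score.1 ≠ pvDiffWitnessOut_get_incomplete_score.2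
def Claim_exact_get_incomplete_score : Prop := ∀ (row : String), Dom_get_incomplete_score row → D_get_incomplete_score row → get_incomplete_score row ≠ get_incomplete_score_alt row

-- ===== LEMMAS AND PROOFS =====

-- A's loop, as recursion over the (sign, score) pairs, state (new_score, first_ind)
def pvLoopA (l : List Char) : List (Char × Int) → Int × Int → Int × Int
  | [], st => st
  | (c, v) :: ps, st =>
    let ind := PySem.Chars.find l [c]
    pvLoopA l ps (if ind > -1 ∧ ind < st.2 then (v, ind) else st)

def pvSigns : List (Char × Int) := [(')', 3), (']', 57), ('}', 1197), ('>', 25137)]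

-- index and score of the first closing bracket, if any
def pvFirstClose : List Char → Option (Nat × Int)
  | [] => none
  | c :: t =>
    if c = ')' then some (0, 3)
    else if c = ']' then some (0, 57)
    else if c = '}' then some (0, 1197)
    else if c = '>' then some (0, 25137)
    else (pvFirstClose t).map (fun p => (p.1 + 1, p.2))

theorem pv_find_cons_self (c : Char) (t : List Char) :
    PySem.Chars.find (c :: t) [c] = 0 := by
  have hinf : [c] <:+: (c :: t) := ⟨[], t, rfl⟩
  have h0 : 0 ≤ PySem.Chars.find (c :: t) [c] := (PySem.Chars.find_nonneg_iff _ _).2 hinf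
  have hs := PySem.Chars.find_spec h0
  by_contra hne
  have hpos : 0 < (PySem.Chars.find (c :: t) [c]).toNat := by omega
  exact hs.2 0 hpos ⟨t, rfl⟩

theorem pv_find_cons_ne (c d : Char) (t : List Char) (h : c ≠ d) :
    PySem.Chars.find (c :: t) [d] =
      (if PySem.Chars.find t [d] = -1 then -1 else PySem.Chars.find t [d] + 1) := by
  have hpref : ∀ (l : List Char) (x : Char), [d] <+: (x :: l) ↔ x = d := by
    intro l x
    constructor
    · rintro ⟨r, hr⟩; injection hr with h1 _; exact h1.symm
    · rintro rfl; exact ⟨l, rfl⟩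
  by_cases hft : PySem.Chars.find t [d] = -1
  · simp only [hft, if_pos]
    rw [PySem.Chars.find_eq_neg_one_iff] at hft ⊢
    intro hinf
    rcases List.infix_cons_iff.1 hinf with hp | hi
    · exact h ((hpref t c).1 hp)
    · exact hft hi
  · simp only [hft, if_neg, not_false_iff]
    have hft0 : 0 ≤ PySem.Chars.find t [d] := by
      have := PySem.Chars.neg_one_le_find t [d]; omega
    have hst := PySem.Chars.find_spec hft0
    have hinf : [d] <:+: (c :: t) := by
      apply List.infix_cons_iff.2; right
      exact ((PySem.Chars.find_nonneg_iff t [d]).1 hft0)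
    have h0 : 0 ≤ PySem.Chars.find (c :: t) [d] := (PySem.Chars.find_nonneg_iff _ _).2 hinf
    have hs := PySem.Chars.find_spec h0
    obtain ⟨i, hi⟩ : ∃ n : Nat, PySem.Chars.find (c :: t) [d] = (n : Int) :=
      ⟨_, (Int.toNat_of_nonneg h0).symm⟩
    obtain ⟨j, hj⟩ : ∃ n : Nat, PySem.Chars.find t [d] = (n : Int) :=
      ⟨_, (Int.toNat_of_nonneg hft0).symm⟩
    rw [hi] at hs
    rw [hj] at hst
    simp only [Int.toNat_natCast] at hs hst
    rw [hi, hj]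
    have hle : ¬ (j + 1 < i) := fun hlt => hs.2 (j + 1) hlt (by simpa using hst.1)
    have hge : ¬ (i < j + 1) := by
      intro hlt
      rcases Nat.eq_zero_or_pos i with rfl | hpos
      · exact h ((hpref t c).1 (by simpa using hs.1))
      · obtain ⟨m, rfl⟩ : ∃ m, i = m + 1 := ⟨i - 1, by omega⟩
        exact hst.2 m (by omega) (by simpa [List.drop_succ_cons] using hs.1)
    omega

theorem pv_find_nil_single (d : Char) : PySem.Chars.find [] [d] = -1 := by
  rw [PySem.Chars.find_eq_neg_one_iff]
  intro hinf
  have := List.eq_nil_of_infix_nil hinf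
  simp at this

-- a non-matching head shifts every find by one: the loop on c::l with threshold k
-- behaves like the loop on l with threshold k-1
theorem pv_loopA_shift (ps : List (Char × Int)) (l : List Char) (c : Char)
    (hc : ∀ p ∈ ps, p.1 ≠ c) (s k : Int) :
    (pvLoopA (c :: l) ps (s, k)).1 = (pvLoopA l ps (s, k - 1)).1 := by
  induction ps generalizing s k with
  | nil => simp [pvLoopA]
  | cons p ps ih =>
    obtain ⟨d, v⟩ := p
    have hdc : c ≠ d := fun h => hc (d, v) List.mem_cons_self h.symm
    have hps : ∀ p ∈ ps, p.1 ≠ c := fun p hp => hc p (List.mem_cons_of_mem _ hp)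
    simp only [pvLoopA, pv_find_cons_ne c d l hdc]
    have hb := PySem.Chars.neg_one_le_find l [d]
    by_cases hbn : PySem.Chars.find l [d] = -1
    · simp only [hbn, if_pos]
      rw [if_neg (by omega : ¬ ((-1:Int) > -1 ∧ (-1:Int) < k)),
          if_neg (by omega : ¬ ((-1:Int) > -1 ∧ (-1:Int) < k - 1))]
      exact ih hps s k
    · simp only [hbn, if_neg, not_false_iff]
      set b := PySem.Chars.find l [d] with hbdef
      by_cases hcond : b > -1 ∧ b < k - 1
      · rw [if_pos (by omega : b + 1 > -1 ∧ b + 1 < k), if_pos hcond]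
        have := ih hps v (b + 1)
        simpa using this
      · rw [if_neg (by omega : ¬ (b + 1 > -1 ∧ b + 1 < k)), if_neg hcond]
        exact ih hps s k

-- characterization of A's loop: the score of the first closing bracket if its index beats k, else 0
theorem pv_loopA_eq (l : List Char) (k : Int) :
    (pvLoopA l pvSigns ((0 : Int), k)).1 =
      (match pvFirstClose l with
       | none => 0
       | some p => if (p.1 : Int) < k then p.2 else 0) := by
  induction l generalizing k with
  | nil =>
    simp [pvLoopA, pvSigns, pvFirstClose, pv_find_nil_single]
  | cons c t ih =>
    by_cases h1 : c = ')'
    · subst h1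
      have e1 := pv_find_cons_self ')' t
      have e2 := pv_find_cons_ne ')' ']' t (by decide)
      have e3 := pv_find_cons_ne ')' '}' t (by decide)
      have e4 := pv_find_cons_ne ')' '>' t (by decide)
      have b2 := PySem.Chars.neg_one_le_find t [']']
      have b3 := PySem.Chars.neg_one_le_find t ['}']
      have b4 := PySem.Chars.neg_one_le_find t ['>']
      simp only [pvSigns, pvLoopA, pvFirstClose, e1, e2, e3, e4]
      generalize hx2 : PySem.Chars.find t [']'] = x2 at b2 ⊢
      generalize hx3 : PySem.Chars.find t ['}'] = x3 at b3 ⊢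
      generalize hx4 : PySem.Chars.find t ['>'] = x4 at b4 ⊢
      clear e1 e2 e3 e4 hx2 hx3 hx4 ih
      simp only [Int.reduceNeg, gt_iff_lt, Nat.cast_zero, Char.reduceEq, reduceIte]
      by_cases cA : x2 = -1 <;> by_cases cB : x3 = -1 <;> by_cases cC : x4 = -1 <;>
        simp [cA, cB, cC] <;> split_ifs <;> omega
    · by_cases h2 : c = ']'
      · subst h2
        have e1 := pv_find_cons_ne ']' ')' t (by decide)
        have e2 := pv_find_cons_self ']' t
        have e3 := pv_find_cons_ne ']' '}' t (by decide)
        have e4 := pv_find_cons_ne ']' '>' t (by decide)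
        have b1 := PySem.Chars.neg_one_le_find t [')']
        have b3 := PySem.Chars.neg_one_le_find t ['}']
        have b4 := PySem.Chars.neg_one_le_find t ['>']
        simp only [pvSigns, pvLoopA, pvFirstClose, e1, e2, e3, e4]
        generalize hx1 : PySem.Chars.find t [')'] = x1 at b1 ⊢
        generalize hx3 : PySem.Chars.find t ['}'] = x3 at b3 ⊢
        generalize hx4 : PySem.Chars.find t ['>'] = x4 at b4 ⊢
        clear e1 e2 e3 e4 hx1 hx3 hx4 ih
        simp only [Int.reduceNeg, gt_iff_lt, Nat.cast_zero, Char.reduceEq, reduceIte]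
        by_cases cA : x1 = -1 <;> by_cases cB : x3 = -1 <;> by_cases cC : x4 = -1 <;>
          simp [cA, cB, cC] <;> split_ifs <;> omega
      · by_cases h3 : c = '}'
        · subst h3
          have e1 := pv_find_cons_ne '}' ')' t (by decide)
          have e2 := pv_find_cons_ne '}' ']' t (by decide)
          have e3 := pv_find_cons_self '}' t
          have e4 := pv_find_cons_ne '}' '>' t (by decide)
          have b1 := PySem.Chars.neg_one_le_find t [')']
          have b2 := PySem.Chars.neg_one_le_find t [']']
          have b4 := PySem.Chars.neg_one_le_find t ['>']
          simp only [pvSigns, pvLoopA, pvFirstClose, e1, e2, e3, e4]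
          generalize hx1 : PySem.Chars.find t [')'] = x1 at b1 ⊢
          generalize hx2 : PySem.Chars.find t [']'] = x2 at b2 ⊢
          generalize hx4 : PySem.Chars.find t ['>'] = x4 at b4 ⊢
          clear e1 e2 e3 e4 hx1 hx2 hx4 ih
          simp only [Int.reduceNeg, gt_iff_lt, Nat.cast_zero, Char.reduceEq, reduceIte]
          by_cases cA : x1 = -1 <;> by_cases cB : x2 = -1 <;> by_cases cC : x4 = -1 <;>
            simp [cA, cB, cC] <;> split_ifs <;> omega
        · by_cases h4 : c = '>'
          · subst h4
            have e1 := pv_find_cons_ne '>' ')' t (by decide)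
            have e2 := pv_find_cons_ne '>' ']' t (by decide)
            have e3 := pv_find_cons_ne '>' '}' t (by decide)
            have e4 := pv_find_cons_self '>' t
            have b1 := PySem.Chars.neg_one_le_find t [')']
            have b2 := PySem.Chars.neg_one_le_find t [']']
            have b3 := PySem.Chars.neg_one_le_find t ['}']
            simp only [pvSigns, pvLoopA, pvFirstClose, e1, e2, e3, e4]
            generalize hx1 : PySem.Chars.find t [')'] = x1 at b1 ⊢
            generalize hx2 : PySem.Chars.find t [']'] = x2 at b2 ⊢
            generalize hx3 : PySem.Chars.find t ['}'] = x3 at b3 ⊢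
            clear e1 e2 e3 e4 hx1 hx2 hx3 ih
            simp only [Int.reduceNeg, gt_iff_lt, Nat.cast_zero, Char.reduceEq, reduceIte]
            by_cases cA : x1 = -1 <;> by_cases cB : x2 = -1 <;> by_cases cC : x3 = -1 <;>
              simp [cA, cB, cC] <;> split_ifs <;> omega
          · have hshift := pv_loopA_shift pvSigns t c
              (by simp only [pvSigns, List.mem_cons]
                  rintro p (rfl | rfl | rfl | rfl | h) <;>
                    first
                      | exact fun h => h1 h.symm
                      | exact fun h => h2 h.symm
                      | exact fun h => h3 h.symm
                      | exact fun h => h4 h.symm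
                      | simp at h)
              0 k
            rw [hshift, ih (k - 1)]
            simp only [pvFirstClose, if_neg h1, if_neg h2, if_neg h3, if_neg h4]
            cases pvFirstClose t with
            | none => simp
            | some p =>
              simp only [Option.map_some]
              have hcast : ((p.1 : Int) < k - 1) ↔ (((p.1 + 1 : Nat) : Int) < k) := by
                push_cast; omega
              split_ifs with ha hb hb
              · rfl
              · exact absurd (hcast.1 ha) hb
              · exact absurd (hcast.2 hb) ha
              · rfl

theorem pv_A_eq_loopA (row : String) :
    get_incomplete_score row = (pvLoopA row.toList pvSigns ((0 : Int), 1000)).1 := rfl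

-- B's full pass, against the first-closing-bracket view of the list
theorem pv_alt_full (l : List Char) :
    pvAltGo (PySem.Dict.ofList [(')', 3), (']', 57), ('}', 1197), ('>', 25137)]) l =
      (match pvFirstClose l with
       | none => 0
       | some p => p.2) := by
  induction l with
  | nil => simp [pvAltGo, pvFirstClose]
  | cons c t ih =>
    by_cases h1 : c = ')'
    · subst h1
      have hg : (PySem.Dict.ofList [(')', (3:Int)), (']', 57), ('}', 1197), ('>', 25137)]).get? ')' = some 3 := by decide
      simp [pvAltGo, hg, pvFirstClose]
    · by_cases h2 : c = ']'
      · subst h2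
        have hg : (PySem.Dict.ofList [(')', (3:Int)), (']', 57), ('}', 1197), ('>', 25137)]).get? ']' = some 57 := by decide
        simp [pvAltGo, hg, pvFirstClose]
      · by_cases h3 : c = '}'
        · subst h3
          have hg : (PySem.Dict.ofList [(')', (3:Int)), (']', 57), ('}', 1197), ('>', 25137)]).get? '}' = some 1197 := by decide
          simp [pvAltGo, hg, pvFirstClose]
        · by_cases h4 : c = '>'
          · subst h4
            have hg : (PySem.Dict.ofList [(')', (3:Int)), (']', 57), ('}', 1197), ('>', 25137)]).get? '>' = some 25137 := by decide
            simp [pvAltGo, hg, pvFirstClose]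
          · have hmk : (PySem.Dict.ofList [(')', (3:Int)), (']', 57), ('}', 1197), ('>', 25137)]) = PySem.Dict.mk [(')', (3:Int)), (']', 57), ('}', 1197), ('>', 25137)] := by decide
            have g1 : ((')' : Char) == c) = false := beq_eq_false_iff_ne.2 (fun h => h1 h.symm)
            have g2 : ((']' : Char) == c) = false := beq_eq_false_iff_ne.2 (fun h => h2 h.symm)
            have g3 : (('}' : Char) == c) = false := beq_eq_false_iff_ne.2 (fun h => h3 h.symm)
            have g4 : (('>' : Char) == c) = false := beq_eq_false_iff_ne.2 (fun h => h4 h.symm)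
            have hg : (PySem.Dict.ofList [(')', (3:Int)), (']', 57), ('}', 1197), ('>', 25137)]).get? c = none := by
              rw [hmk]
              simp [g1, g2, g3, g4, PySem.Dict.get?]
            simp only [pvAltGo, hg, pvFirstClose, if_neg h1, if_neg h2, if_neg h3, if_neg h4]
            rw [ih]
            cases pvFirstClose t <;> simp

theorem pv_alt_eq (row : String) :
    get_incomplete_score_alt row =
      (match pvFirstClose row.toList with
       | none => 0
       | some p => p.2) := pv_alt_full row.toList

-- pvIsClose against the branch tests of pvFirstClose
theorem pv_isClose_iff (c : Char) :
    pvIsClose c = true ↔ (c = ')' ∨ c = ']' ∨ c = '}' ∨ c = '>') := by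
  simp [pvIsClose, or_assoc]

-- a closing-bracket head is found at index 0
theorem pv_first_cons_close (c : Char) (t : List Char) (hc : pvIsClose c = true) :
    ∃ s : Int, pvFirstClose (c :: t) = some (0, s) := by
  rcases (pv_isClose_iff c).1 hc with rfl | rfl | rfl | rfl <;> exact ⟨_, rfl⟩

-- no closing bracket at all iff pvFirstClose finds none
theorem pv_first_none_iff (l : List Char) :
    pvFirstClose l = none ↔ l.any pvIsClose = false := by
  induction l with
  | nil => simp [pvFirstClose]
  | cons c t ih =>
    by_cases hc : pvIsClose c = true
    · rcases (pv_isClose_iff c).1 hc with rfl | rfl | rfl | rfl <;> simp [pvFirstClose, pvIsClose]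
    · have h1 : c ≠ ')' := fun h => hc ((pv_isClose_iff c).2 (Or.inl h))
      have h2 : c ≠ ']' := fun h => hc ((pv_isClose_iff c).2 (Or.inr (Or.inl h)))
      have h3 : c ≠ '}' := fun h => hc ((pv_isClose_iff c).2 (Or.inr (Or.inr (Or.inl h))))
      have h4 : c ≠ '>' := fun h => hc ((pv_isClose_iff c).2 (Or.inr (Or.inr (Or.inr h))))
      have hc' : pvIsClose c = false := by simpa using hc
      simp only [pvFirstClose, if_neg h1, if_neg h2, if_neg h3, if_neg h4, List.any_cons,
        Option.map_eq_none_iff, Bool.or_eq_false_iff, hc', true_and, ih]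

-- the first n characters are bracket-free iff every first-bracket index is ≥ n
theorem pv_take_all_iff (l : List Char) (n : Nat) :
    ((l.take n).all (fun c => !pvIsClose c) = true) ↔
      (∀ p, pvFirstClose l = some p → n ≤ p.1) := by
  induction l generalizing n with
  | nil => simp [pvFirstClose]
  | cons c t ih =>
    cases n with
    | zero => simp
    | succ m =>
      rw [List.take_succ_cons]
      by_cases hc : pvIsClose c = true
      · have hL : ((c :: t.take m).all (fun c => !pvIsClose c)) = false := by simp [hc]
        rw [hL]
        obtain ⟨sc, hs⟩ := pv_first_cons_close c t hc
        constructor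
        · intro h; exact absurd h (by simp)
        · intro h; exact absurd (h (0, sc) hs) (by omega)
      · have h1 : c ≠ ')' := fun h => hc ((pv_isClose_iff c).2 (Or.inl h))
        have h2 : c ≠ ']' := fun h => hc ((pv_isClose_iff c).2 (Or.inr (Or.inl h)))
        have h3 : c ≠ '}' := fun h => hc ((pv_isClose_iff c).2 (Or.inr (Or.inr (Or.inl h))))
        have h4 : c ≠ '>' := fun h => hc ((pv_isClose_iff c).2 (Or.inr (Or.inr (Or.inr h))))
        have hc' : pvIsClose c = false := by simpa using hc
        simp only [pvFirstClose, if_neg h1, if_neg h2, if_neg h3, if_neg h4, List.all_cons,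
          Bool.and_eq_true, Bool.not_eq_true', hc']
        constructor
        · rintro ⟨_, htake⟩ p hp
          rcases Option.map_eq_some_iff.1 hp with ⟨q, hq, rfl⟩
          have := (ih m).1 htake q hq
          simpa using Nat.succ_le_succ this
        · intro h
          refine ⟨trivial, (ih m).2 ?_⟩
          intro q hq
          have := h (q.1 + 1, q.2) (by simp [hq])
          omega

-- every score pvFirstClose reports is nonzero
theorem pv_first_snd_ne (l : List Char) (p : Nat × Int) (h : pvFirstClose l = some p) :
    p.2 ≠ 0 := by
  induction l generalizing p with
  | nil => simp [pvFirstClose] at h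
  | cons c t ih =>
    simp only [pvFirstClose] at h
    split_ifs at h <;> first
      | (injection h with h; subst h; decide)
      | (rcases Option.map_eq_some_iff.1 h with ⟨q, hq, rfl⟩; exact ih q hq)

-- ===== VERDICT (by name: the statement is the Claim_ definition above) =====
theorem get_incomplete_score_spec : Claim_unchanged_get_incomplete_score := by
  intro row _ hnd
  show get_incomplete_score row = get_incomplete_score_alt row
  rw [pv_A_eq_loopA, pv_loopA_eq, pv_alt_eq]
  cases hfc : pvFirstClose row.toList with
  | none => rfl
  | some p =>
    simp only []
    have hany : row.toList.any pvIsClose = true := by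
      by_contra hno
      rw [Bool.not_eq_true] at hno
      rw [(pv_first_none_iff row.toList).2 hno] at hfc
      simp at hfc
    have hlt : (p.1 : Int) < 1000 := by
      by_contra hge
      apply hnd
      refine ⟨(pv_take_all_iff row.toList 1000).2 ?_, hany⟩
      intro q hq
      rw [hfc] at hq
      injection hq with hq; subst hq
      omega
    rw [if_pos hlt]

set_option maxRecDepth 100000 in
theorem pv_wit_ofList :
    pvDiffWitness_get_incomplete_score = String.ofList (List.replicate 1000 'a' ++ [')']) := by
  decide

theorem pv_wit_toList :
    pvDiffWitness_get_incomplete_score.toList = List.replicate 1000 'a' ++ [')'] := by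
  rw [pv_wit_ofList]; exact String.toList_ofList

theorem pv_first_repl (n : Nat) :
    pvFirstClose (List.replicate n 'a' ++ [')']) = some (n, 3) := by
  induction n with
  | zero => rfl
  | succ m ih =>
    rw [List.replicate_succ, List.cons_append]
    simp only [pvFirstClose, ih, Char.reduceEq, reduceIte, Option.map_some]

theorem get_incomplete_score_changed : Claim_changed_get_incomplete_score := by
  unfold Claim_changed_get_incomplete_score
  refine ⟨?_, ⟨?_, ?_⟩, ?_, ?_, by decide⟩
  · show pvDomStr _ = true
    unfold pvDomStr
    rw [pv_wit_toList, List.all_eq_true]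
    intro c hc
    rcases List.mem_append.1 hc with h | h
    · rw [List.eq_of_mem_replicate h]; decide
    · simp only [List.mem_singleton] at h; subst h; decide
  · rw [pv_wit_toList, List.take_left' List.length_replicate, List.all_eq_true]
    intro c hc
    rw [List.eq_of_mem_replicate hc]; decide
  · rw [pv_wit_toList, List.any_append]
    have h1 : ([')'] : List Char).any pvIsClose = true := by decide
    rw [h1, Bool.or_true]
  · rw [pv_A_eq_loopA, pv_loopA_eq, pv_wit_toList, pv_first_repl]
    show (if ((1000:Nat):Int) < 1000 then (3:Int) else 0) = 0
    norm_num
  · rw [pv_alt_eq, pv_wit_toList, pv_first_repl]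
    rfl

theorem get_incomplete_score_tight : Claim_exact_get_incomplete_score := by
  intro row _ hd
  rw [pv_A_eq_loopA, pv_loopA_eq, pv_alt_eq]
  obtain ⟨htake, hany⟩ := hd
  cases hfc : pvFirstClose row.toList with
  | none =>
    rw [pv_first_none_iff] at hfc
    rw [hfc] at hany
    exact Bool.noConfusion hany
  | some p =>
    simp only []
    have hge : 1000 ≤ p.1 := (pv_take_all_iff row.toList 1000).1 htake p hfc
    rw [if_neg (by omega)]
    exact fun h => pv_first_snd_ne row.toList p hfc h.symm
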